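-- pv_equiv track=rewrite | github.com/hyuuny/backjoon-algorithm | 프로그래머스/lv1/92334. 신고 결과 받기/신고 결과 받기.py | solution
-- ===== SOURCE A (Python) =====
-- def solution(id_list, report, k):
--     report_hash = {}
--     result_hash = {}
--
--     for r in report:
--         user, bad = r.split()
--         if user not in report_hash:
--             report_hash[user] = set()
--         report_hash[user].add(bad)
--
--         if bad not in result_hash:
--             result_hash[bad] = set()
--         result_hash[bad].add(user)
--
--     answer = [0 for _ in range(len(id_list))]
--     for i in range(len(id_list)):
--         user = id_list[i]
--         if user not in report_hash:
--             continue
--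
--         for bad in report_hash[user]:
--             if len(result_hash[bad]) >= k:
--                 answer[i] += 1
--
--     return answer
-- ===== SOURCE B (Python) =====
-- def solution(id_list, report, k):
--     pairs = set()
--     for r in report:
--         user, bad = r.split()
--         pairs.add((user, bad))
--
--     counts = {}
--     for _, bad in pairs:
--         counts[bad] = counts.get(bad, 0) + 1
--
--     banned = set()
--     for bad, c in counts.items():
--         if c >= k:
--             banned.add(bad)
--
--     score = {}
--     for user, bad in pairs:
--         if bad in banned:
--             score[user] = score.get(user, 0) + 1
--
--     return [score.get(u, 0) for u in id_list]
-- ===== Notes on version B (the rewrite author's own statement) =====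
-- stated objective: alternative
-- what changed: B deduplicates the reports into a set of (reporter, reported) pairs once, tallies distinct reporters per reported user, collapses that into a precomputed banned set and a per-reporter score dict in flat passes, so the answer is a plain lookup per id instead of A's nested per-user loop that re-checks len(result_hash[bad]) >= k for every reported user.
import Mathlib
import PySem

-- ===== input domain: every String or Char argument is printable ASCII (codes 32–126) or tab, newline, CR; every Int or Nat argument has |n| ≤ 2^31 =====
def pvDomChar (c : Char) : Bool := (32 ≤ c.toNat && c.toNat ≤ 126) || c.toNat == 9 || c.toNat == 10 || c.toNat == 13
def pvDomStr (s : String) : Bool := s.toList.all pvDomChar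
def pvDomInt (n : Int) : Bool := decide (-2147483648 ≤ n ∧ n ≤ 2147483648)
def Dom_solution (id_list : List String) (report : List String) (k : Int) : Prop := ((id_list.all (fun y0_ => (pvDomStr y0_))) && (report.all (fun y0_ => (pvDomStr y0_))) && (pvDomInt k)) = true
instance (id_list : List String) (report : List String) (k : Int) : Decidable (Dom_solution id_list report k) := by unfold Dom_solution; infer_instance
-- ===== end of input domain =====

-- B replaces A's nested per-user loop (which re-checks len(result_hash[bad]) >= k for every
-- reported user) by a deduplicated pair set, a precomputed banned set and a per-reporter score
-- dict, so each answer entry is a single lookup (objective: alternative decomposition).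

-- ===== PORT A =====
-- 'user, bad = r.split()' (exact under Pre_: the split has exactly two words)
def pvParse (r : String) : String × String :=
  match PySem.Str.split₀ r with
  | [u, b] => (u, b)
  | _ => ("", "")

def solution (id_list : List String) (report : List String) (k : Int) : List Int :=
  let hs := report.foldl
    (fun (hs : PySem.Dict String (PySem.Set String) × PySem.Dict String (PySem.Set String)) r =>
      (hs.1.modify (pvParse r).1 PySem.Set.empty (fun s => PySem.Set.add s (pvParse r).2),
       hs.2.modify (pvParse r).2 PySem.Set.empty (fun s => PySem.Set.add s (pvParse r).1)))
    (PySem.Dict.empty, PySem.Dict.empty)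
  let answer := (PySem.List.pyRange 0 (id_list.length) 1).map (fun _ => (0 : Int))
  (PySem.List.pyRange 0 (id_list.length) 1).foldl
    (fun ans i =>
      match hs.1.get? (PySem.List.pyGetD id_list i "") with
      | none => ans
      | some bads =>
        bads.foldl (fun a bad =>
          if k ≤ PySem.Set.len (hs.2.getD bad PySem.Set.empty)
          then PySem.List.pySetD a i (PySem.List.pyGetD a i 0 + 1) else a) ans)
    answer

-- ===== PORT B =====
def solution_alt (id_list : List String) (report : List String) (k : Int) : List Int :=
  let pairs : PySem.Set (String × String) :=
    report.foldl (fun s r => PySem.Set.add s (pvParse r)) PySem.Set.empty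
  let counts : PySem.Dict String Int :=
    pairs.foldl (fun d p => d.modify p.2 0 (· + 1)) PySem.Dict.empty
  let banned : PySem.Set String :=
    counts.items.foldl (fun s p => if k ≤ p.2 then PySem.Set.add s p.1 else s) PySem.Set.empty
  let score : PySem.Dict String Int :=
    pairs.foldl (fun d p => if PySem.Set.contains banned p.2 then d.modify p.1 0 (· + 1) else d)
      PySem.Dict.empty
  id_list.map (fun u => score.getD u 0)

-- ===== PRECONDITION & SPEC =====
-- Pre_ excludes exactly the reports on which 'user, bad = r.split()' raises ValueError
-- (a report whose number of whitespace-separated words is not 2).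
def Pre_solution (id_list : List String) (report : List String) (k : Int) : Prop :=
  ∀ r ∈ report, (PySem.Str.split₀ r).length = 2
instance (id_list : List String) (report : List String) (k : Int) : Decidable (Pre_solution id_list report k) := by unfold Pre_solution; infer_instance

def pvWitness_solution : List String × List String × Int := (["muzi", "frodo"], ["muzi frodo", "frodo muzi", "muzi frodo"], 1)

def Spec_solution (id_list : List String) (report : List String) (k : Int) (out : List Int) : Prop := out = solution_alt id_list report k
instance (id_list : List String) (report : List String) (k : Int) (out : List Int) : Decidable (Spec_solution id_list report k out) := by unfold Spec_solution; infer_instance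

-- ===== CLAIM (what is proved, stated in full; the proofs are below) =====
def Claim_equal_solution : Prop := ∀ (id_list : List String) (report : List String) (k : Int), Dom_solution id_list report k → Pre_solution id_list report k → Spec_solution id_list report k (solution id_list report k)

-- ===== LEMMAS AND PROOFS =====

-- proof-side helpers: the deduplicated parsed report and the common counting function
def pvPrs (report : List String) : List (String × String) := report.map pvParse

def pvP (report : List String) : PySem.Set (String × String) := PySem.Set.ofList (pvPrs report)

def pvHot (report : List String) (k : Int) (b : String) : Bool :=
  decide (k ≤ (List.countP (fun p => p.2 == b) (pvP report) : Int))

def pvN (report : List String) (k : Int) (u : String) : Int :=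
  (List.countP (fun p => p.1 == u && pvHot report k p.2) (pvP report) : Int)

def pvStepG (kf vf : String × String → String)
    (d : PySem.Dict String (PySem.Set String)) (p : String × String) :
    PySem.Dict String (PySem.Set String) :=
  d.modify (kf p) PySem.Set.empty (fun s => PySem.Set.add s (vf p))

lemma pvLenNodup {γ : Type} (l1 l2 : List γ) (h1 : l1.Nodup) (h2 : l2.Nodup)
    (h : ∀ x, x ∈ l1 ↔ x ∈ l2) : l1.length = l2.length :=
  ((List.perm_ext_iff_of_nodup h1 h2).2 h).length_eq

lemma pvCount1 (xs : List (String × String)) (u : String) (q : String → Bool) :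
    List.countP q (PySem.Set.ofList ((xs.filter (fun p => p.1 == u)).map (fun p => p.2)))
      = List.countP (fun p => p.1 == u && q p.2) (PySem.Set.ofList xs) := by
  rw [List.countP_eq_length_filter, List.countP_eq_length_filter]
  rw [show (List.filter (fun p => p.1 == u && q p.2) (PySem.Set.ofList xs)).length
        = ((List.filter (fun p => p.1 == u && q p.2) (PySem.Set.ofList xs)).map (fun p => p.2)).length
      from (List.length_map ..).symm]
  apply pvLenNodup
  · exact List.Nodup.filter _ (PySem.Set.nodup_ofList _)
  · apply List.Nodup.map_on
    · intro p hp p' hp' hsnd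
      simp only [List.mem_filter, Bool.and_eq_true, beq_iff_eq] at hp hp'
      exact Prod.ext (hp.2.1.trans hp'.2.1.symm) hsnd
    · exact List.Nodup.filter _ (PySem.Set.nodup_ofList _)
  · intro x
    simp only [List.mem_filter, List.mem_map, PySem.Set.mem_ofList, Bool.and_eq_true, beq_iff_eq]
    constructor
    · rintro ⟨⟨p, ⟨hpx, hpu⟩, hpsnd⟩, hq⟩
      exact ⟨p, ⟨hpx, hpu, by rwa [hpsnd]⟩, hpsnd⟩
    · rintro ⟨p, ⟨hpx, hpu, hq⟩, hpsnd⟩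
      exact ⟨⟨p, ⟨hpx, hpu⟩, hpsnd⟩, by rwa [← hpsnd]⟩

lemma pvCount2 (xs : List (String × String)) (b : String) :
    (PySem.Set.ofList ((xs.filter (fun p => p.2 == b)).map (fun p => p.1))).length
      = List.countP (fun p => p.2 == b) (PySem.Set.ofList xs) := by
  rw [List.countP_eq_length_filter]
  rw [show (List.filter (fun p => p.2 == b) (PySem.Set.ofList xs)).length
        = ((List.filter (fun p => p.2 == b) (PySem.Set.ofList xs)).map (fun p => p.1)).length
      from (List.length_map ..).symm]
  apply pvLenNodup
  · exact PySem.Set.nodup_ofList _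
  · apply List.Nodup.map_on
    · intro p hp p' hp' hfst
      simp only [List.mem_filter, beq_iff_eq] at hp hp'
      exact Prod.ext hfst (hp.2.trans hp'.2.symm)
    · exact List.Nodup.filter _ (PySem.Set.nodup_ofList _)
  · intro x
    simp only [List.mem_filter, List.mem_map, PySem.Set.mem_ofList, beq_iff_eq]

lemma pvGroupG (kf vf : String × String → String) :
    ∀ (xs : List (String × String)) (d : PySem.Dict String (PySem.Set String)) (u : String),
      (xs.foldl (pvStepG kf vf) d).getD u PySem.Set.empty
        = PySem.Set.update (d.getD u PySem.Set.empty) ((xs.filter (fun p => kf p == u)).map vf)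
  | [], d, u => by simp [PySem.Set.update_nil]
  | p :: xs, d, u => by
    rw [List.foldl_cons, pvGroupG kf vf xs (pvStepG kf vf d p) u]
    by_cases h : u = kf p
    · rw [show (pvStepG kf vf d p).getD u PySem.Set.empty
            = PySem.Set.add (d.getD u PySem.Set.empty) (vf p) by
          simp [pvStepG, h]]
      rw [List.filter_cons, if_pos (by simp [h]), List.map_cons, PySem.Set.update_cons]
    · rw [show (pvStepG kf vf d p).getD u PySem.Set.empty = d.getD u PySem.Set.empty by
          simp [pvStepG, PySem.Dict.getD_modify, h]]
      rw [List.filter_cons, if_neg (by simp; exact fun hh => h hh.symm)]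

lemma pvHsEq (report : List String) :
    report.foldl
      (fun (hs : PySem.Dict String (PySem.Set String) × PySem.Dict String (PySem.Set String)) r =>
        (hs.1.modify (pvParse r).1 PySem.Set.empty (fun s => PySem.Set.add s (pvParse r).2),
         hs.2.modify (pvParse r).2 PySem.Set.empty (fun s => PySem.Set.add s (pvParse r).1)))
      (PySem.Dict.empty, PySem.Dict.empty)
    = ((pvPrs report).foldl (pvStepG (fun p => p.1) (fun p => p.2)) PySem.Dict.empty,
       (pvPrs report).foldl (pvStepG (fun p => p.2) (fun p => p.1)) PySem.Dict.empty) := by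
  rw [pvPrs, List.foldl_map, List.foldl_map]
  exact PySem.List.foldl_prod_mk
    (fun d r => pvStepG (fun p => p.1) (fun p => p.2) d (pvParse r))
    (fun d r => pvStepG (fun p => p.2) (fun p => p.1) d (pvParse r))
    report PySem.Dict.empty PySem.Dict.empty

lemma pvRhGetD (report : List String) (u : String) :
    ((pvPrs report).foldl (pvStepG (fun p => p.1) (fun p => p.2)) PySem.Dict.empty).getD u PySem.Set.empty
      = PySem.Set.ofList (((pvPrs report).filter (fun p => p.1 == u)).map (fun p => p.2)) := by
  rw [pvGroupG, PySem.Dict.getD_empty, PySem.Set.update_empty]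

lemma pvShGetD (report : List String) (b : String) :
    ((pvPrs report).foldl (pvStepG (fun p => p.2) (fun p => p.1)) PySem.Dict.empty).getD b PySem.Set.empty
      = PySem.Set.ofList (((pvPrs report).filter (fun p => p.2 == b)).map (fun p => p.1)) := by
  rw [pvGroupG, PySem.Dict.getD_empty, PySem.Set.update_empty]

lemma pvRhKeys (report : List String) :
    ((pvPrs report).foldl (pvStepG (fun p => p.1) (fun p => p.2)) PySem.Dict.empty).keys
      = PySem.Set.ofList ((pvPrs report).map (fun p => p.1)) := by
  unfold pvStepG
  rw [PySem.Dict.keys_foldl_modify_key (pvPrs report) (fun p => p.1) PySem.Set.empty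
      (fun _ p => fun s => PySem.Set.add s p.2) PySem.Dict.empty]
  rw [PySem.Dict.keys_empty, PySem.Set.update_nil_left]

lemma pvSetSelf (l : List Int) (j : Nat) (_ : j < l.length) : l.set j (l.getD j 0) = l := by
  apply List.ext_getElem (by simp)
  intro n h1 h2
  rw [List.getElem_set]
  split_ifs with hn
  · subst hn; rw [List.getD_eq_getElem?_getD, List.getElem?_eq_getElem h2, Option.getD_some]
  · rfl

lemma pvInner (c : String → Prop) [DecidablePred c] :
    ∀ (bads : List String) (ans : List Int) (j : Nat), j < ans.length →
      bads.foldl (fun a b => if c b then a.set j (a.getD j 0 + 1) else a) ans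
        = ans.set j (ans.getD j 0 + (bads.countP (fun b => decide (c b)) : Int))
  | [], ans, j, hj => by
    simp only [List.foldl_nil, List.countP_nil, Nat.cast_zero, add_zero]
    exact (pvSetSelf ans j hj).symm
  | b :: bads, ans, j, hj => by
    rw [List.foldl_cons]
    by_cases hb : c b
    · rw [if_pos hb, pvInner c bads (ans.set j (ans.getD j 0 + 1)) j (by simpa using hj)]
      rw [List.set_set, List.countP_cons_of_pos (by simpa using hb)]
      rw [List.getD_eq_getElem?_getD, List.getElem?_set_self hj, Option.getD_some]
      rw [List.getD_eq_getElem?_getD]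
      push_cast
      ring_nf
    · rw [if_neg hb, pvInner c bads ans j hj, List.countP_cons_of_neg (by simpa using hb)]

lemma pvOuter (s : List Int → Nat → List Int) (val : Nat → Int)
    (hs : ∀ ans j, j < ans.length → s ans j = ans.set j (ans.getD j 0 + val j)) :
    ∀ (n : Nat) (l : List Int), n ≤ l.length →
      (List.range n).foldl s l = l.mapIdx (fun j x => if j < n then x + val j else x)
  | 0, l, _ => by
    rw [List.range_zero, List.foldl_nil]
    apply List.ext_getElem (by simp)
    intro i h1 h2
    simp [List.getElem_mapIdx]
  | n + 1, l, h => by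
    rw [List.range_succ, List.foldl_append, List.foldl_cons, List.foldl_nil]
    rw [pvOuter s val hs n l (by omega)]
    rw [hs _ n (by simp; omega)]
    have hM : (List.mapIdx (fun j x => if j < n then x + val j else x) l).getD n 0
        = l[n]'(by omega) := by
      rw [List.getD_eq_getElem?_getD, List.getElem?_eq_getElem (by simp; omega),
          Option.getD_some, List.getElem_mapIdx, if_neg (by omega)]
    rw [hM]
    apply List.ext_getElem (by simp)
    intro i h1 h2
    rw [List.getElem_set]
    by_cases hi : n = i
    · subst hi
      rw [if_pos rfl]
      simp only [List.getElem_mapIdx]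
      rw [if_pos (by omega)]
    · rw [if_neg hi]
      simp only [List.getElem_mapIdx]
      split_ifs <;> first | rfl | omega

lemma pvNzeroOfNone (report : List String) (k : Int) (u : String)
    (h : u ∉ (pvPrs report).map (fun p => p.1)) : pvN report k u = 0 := by
  have h0 : List.countP (fun p => p.1 == u && pvHot report k p.2) (pvP report) = 0 := by
    rw [List.countP_eq_zero]
    intro p hp
    simp only [Bool.and_eq_true, beq_iff_eq, not_and]
    intro hpu _
    exact h (List.mem_map.2 ⟨p, (PySem.Set.mem_ofList _ _).1 hp, hpu⟩)
  rw [pvN, h0]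
  rfl

lemma pvLA (id_list report : List String) (k : Int) :
    solution id_list report k
      = ((PySem.List.pyRange 0 (id_list.length) 1).map (fun _ => (0 : Int))).mapIdx
          (fun j x => if j < id_list.length then x + pvN report k (id_list.getD j "") else x) := by
  simp only [solution, pvHsEq]
  rw [PySem.List.pyRange_one, List.foldl_map]
  simp only [zero_add, PySem.List.pyGetD_natCast, PySem.List.pySetD_natCast,
    Int.sub_zero, Int.toNat_natCast]
  refine pvOuter _ (fun j => pvN report k (id_list.getD j "")) ?_ id_list.length _ (by simp)
  intro ans j hj
  dsimp only
  cases hcase : ((pvPrs report).foldl (pvStepG (fun p => p.1) (fun p => p.2))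
      PySem.Dict.empty).get? (id_list.getD j "") with
  | none =>
    dsimp only
    have h0 : pvN report k (id_list.getD j "") = 0 := by
      apply pvNzeroOfNone
      intro hmem
      rw [PySem.Dict.get?_eq_none_iff_not_mem_keys] at hcase
      exact hcase (by rw [pvRhKeys]; exact (PySem.Set.mem_ofList _ _).2 hmem)
    rw [h0, add_zero, pvSetSelf ans j hj]
  | some bads =>
    dsimp only
    rw [pvInner (fun b => k ≤ PySem.Set.len
        (((pvPrs report).foldl (pvStepG (fun p => p.2) (fun p => p.1))
          PySem.Dict.empty).getD b PySem.Set.empty)) bads ans j hj]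
    have hbads : bads = PySem.Set.ofList
        (((pvPrs report).filter (fun p => p.1 == (id_list.getD j ""))).map (fun p => p.2)) := by
      have h := pvRhGetD report (id_list.getD j "")
      rwa [PySem.Dict.getD_eq_get?_getD, hcase, Option.getD_some] at h
    congr 2
    rw [hbads]
    rw [show (fun b => decide (k ≤ PySem.Set.len
          (((pvPrs report).foldl (pvStepG (fun p => p.2) (fun p => p.1))
            PySem.Dict.empty).getD b PySem.Set.empty))) = pvHot report k from by
      funext b
      rw [pvShGetD report b]
      simp only [PySem.Set.len, pvHot, pvCount2, pvP]
      rfl]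
    rw [pvCount1 (pvPrs report) (id_list.getD j "") (pvHot report k)]
    rfl

lemma pvLB (id_list report : List String) (k : Int) :
    solution_alt id_list report k = id_list.map (fun u => pvN report k u) := by
  simp only [solution_alt]
  have hpairs : report.foldl (fun s r => PySem.Set.add s (pvParse r)) PySem.Set.empty
      = pvP report := by
    rw [pvP, pvPrs, ← PySem.Set.update_map_eq_foldl_add, PySem.Set.update_empty]
  rw [hpairs]
  set P := pvP report with hP
  set counts : PySem.Dict String Int := P.foldl (fun d p => d.modify p.2 0 (fun x => x + 1)) PySem.Dict.empty with hcounts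
  set banned := counts.items.foldl
      (fun s p => if k ≤ p.2 then PySem.Set.add s p.1 else s) PySem.Set.empty with hbanned
  set score : PySem.Dict String Int := P.foldl
      (fun d p => if PySem.Set.contains banned p.2 then d.modify p.1 0 (fun x => x + 1) else d)
      PySem.Dict.empty with hscore
  have hcountsD : ∀ b, counts.getD b 0 = (List.countP (fun p => p.2 == b) P : Int) := by
    intro b
    rw [hcounts,
        show P.foldl (fun d p => d.modify p.2 0 (fun x => x + 1)) PySem.Dict.empty
          = (P.map (fun p => p.2)).foldl
              (fun (d : PySem.Dict String Int) x => d.modify x 0 (fun v => v + 1))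
              PySem.Dict.empty from (List.foldl_map (f := fun p : String × String => p.2)
                (g := fun (d : PySem.Dict String Int) x => d.modify x 0 (fun v => v + 1))).symm,
        PySem.Dict.getD_foldl_modify_add_one, PySem.Dict.getD_empty, zero_add,
        List.count_eq_countP, List.countP_map]
    rfl
  have hknodup : counts.keys.Nodup := by
    rw [hcounts]
    exact PySem.Dict.nodup_keys_foldl_modify_key P (fun p => p.2) 0 (fun _ _ => fun v => v + 1)
      PySem.Dict.empty PySem.Dict.nodup_keys_empty
  have hkeys : counts.keys = PySem.Set.ofList (P.map (fun p => p.2)) := by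
    rw [hcounts,
        PySem.Dict.keys_foldl_modify_key P (fun p => p.2) 0 (fun _ _ => fun v => v + 1)
          PySem.Dict.empty,
        PySem.Dict.keys_empty, PySem.Set.update_nil_left]
  have hbannedEq : banned
      = PySem.Set.ofList ((counts.items.filter (fun p => decide (k ≤ p.2))).map (fun p => p.1)) := by
    rw [hbanned,
        show (fun (s : PySem.Set String) (p : String × Int) =>
            if k ≤ p.2 then PySem.Set.add s p.1 else s)
          = (fun s p => if (fun (q : String × Int) => decide (k ≤ q.2)) p = true
              then PySem.Set.add s p.1 else s) from by funext s p; simp,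
        ← List.foldl_filter, ← PySem.Set.update_map_eq_foldl_add, PySem.Set.update_empty]
  have hmemB : ∀ b, b ∈ banned ↔ ∃ c : Int, counts.get? b = some c ∧ k ≤ c := by
    intro b
    rw [hbannedEq]
    simp only [PySem.Set.mem_ofList, List.mem_map, List.mem_filter, decide_eq_true_eq]
    constructor
    · rintro ⟨p, ⟨hpi, hpk⟩, hpb⟩
      refine ⟨p.2, ?_, hpk⟩
      rw [← hpb]
      exact (PySem.Dict.get?_eq_some_iff_mem_items _ _ _ hknodup).2 hpi
    · rintro ⟨c, hgc, hkc⟩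
      exact ⟨(b, c), ⟨(PySem.Dict.get?_eq_some_iff_mem_items _ _ _ hknodup).1 hgc, hkc⟩, rfl⟩
  have hcontain : ∀ p ∈ P, PySem.Set.contains banned p.2 = pvHot report k p.2 := by
    intro p hp
    rw [Bool.eq_iff_iff, PySem.Set.contains_iff, hmemB, pvHot, decide_eq_true_eq, ← hP]
    constructor
    · rintro ⟨c, hgc, hkc⟩
      have hcd : counts.getD p.2 0 = c := by rw [PySem.Dict.getD_eq_get?_getD, hgc]; rfl
      rw [hcountsD p.2] at hcd
      rw [← hcd] at hkc
      exact_mod_cast hkc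
    · intro hk
      have hmemkeys : p.2 ∈ counts.keys := by
        rw [hkeys]
        exact (PySem.Set.mem_ofList _ _).2 (List.mem_map.2 ⟨p, hp, rfl⟩)
      have hne : counts.get? p.2 ≠ none := by
        rw [Ne, PySem.Dict.get?_eq_none_iff_not_mem_keys]
        exact fun hn => hn hmemkeys
      obtain ⟨c, hc⟩ := Option.ne_none_iff_exists'.1 hne
      refine ⟨c, hc, ?_⟩
      have hcd : counts.getD p.2 0 = c := by rw [PySem.Dict.getD_eq_get?_getD, hc]; rfl
      rw [hcountsD p.2] at hcd
      rw [← hcd]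
      exact_mod_cast hk
  apply List.map_congr_left
  intro u _
  have hscoreD : score.getD u 0
      = (List.countP (fun p => p.1 == u && PySem.Set.contains banned p.2) P : Int) := by
    rw [hscore, ← List.foldl_filter,
        show (P.filter (fun p => PySem.Set.contains banned p.2)).foldl
            (fun d p => d.modify p.1 0 (fun x => x + 1)) PySem.Dict.empty
          = ((P.filter (fun p => PySem.Set.contains banned p.2)).map (fun p => p.1)).foldl
              (fun (d : PySem.Dict String Int) x => d.modify x 0 (fun v => v + 1))
              PySem.Dict.empty from (List.foldl_map (f := fun p : String × String => p.1)
                (g := fun (d : PySem.Dict String Int) x => d.modify x 0 (fun v => v + 1))).symm,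
        PySem.Dict.getD_foldl_modify_add_one, PySem.Dict.getD_empty, zero_add,
        List.count_eq_countP, List.countP_map, List.countP_filter]
    rfl
  rw [hscoreD, pvN, ← hP]
  congr 1
  apply List.countP_congr
  intro p hp
  rw [hcontain p hp]

-- ===== VERDICT (by name: the statement is the Claim_ definition above) =====
theorem solution_spec : Claim_equal_solution := by
  intro id_list report k _ _
  unfold Spec_solution
  rw [pvLA, pvLB]
  apply List.ext_getElem (by simp [PySem.List.pyRange_one])
  intro i h1 h2
  simp only [List.getElem_mapIdx, List.getElem_map]
  rw [if_pos (by simpa [PySem.List.pyRange_one] using h1), zero_add,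
      List.getD_eq_getElem?_getD,
      List.getElem?_eq_getElem (show i < id_list.length by simpa using h2), Option.getD_some]
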